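-- pv_equiv track=rewrite | github.com/johnxin66/senior_design | source/temp.py | helperFunc
-- ===== SOURCE A (Python) =====
-- def helperFunc(sampleStr):
--     temp = sampleStr.lower()
--     new = ""
--     for letter in temp:
--         if letter.isalpha():
--             new += letter
--
--
--     n = len(new)
--     for i in range(0,n//2):
--         if(new[i] != new[-(i+1)]):
--             return False
--     return True
-- ===== SOURCE B (Python) =====
-- def helperFunc(sampleStr):
--     s = sampleStr.lower()
--     i, j = 0, len(s) - 1
--     while i < j:
--         if not s[i].isalpha():
--             i += 1
--         elif not s[j].isalpha():
--             j -= 1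
--         elif s[i] != s[j]:
--             return False
--         else:
--             i += 1
--             j -= 1
--     return True
-- ===== Notes on version B (the rewrite author's own statement) =====
-- stated objective: alternative
-- what changed: B never builds a filtered string: it runs an in-place converging two-pointer scan over the original lowered string, skipping non-alphabetic characters at each end on the fly, instead of A's char-by-char concatenation of a cleaned copy followed by an index loop over that copy.
import Mathlib
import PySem

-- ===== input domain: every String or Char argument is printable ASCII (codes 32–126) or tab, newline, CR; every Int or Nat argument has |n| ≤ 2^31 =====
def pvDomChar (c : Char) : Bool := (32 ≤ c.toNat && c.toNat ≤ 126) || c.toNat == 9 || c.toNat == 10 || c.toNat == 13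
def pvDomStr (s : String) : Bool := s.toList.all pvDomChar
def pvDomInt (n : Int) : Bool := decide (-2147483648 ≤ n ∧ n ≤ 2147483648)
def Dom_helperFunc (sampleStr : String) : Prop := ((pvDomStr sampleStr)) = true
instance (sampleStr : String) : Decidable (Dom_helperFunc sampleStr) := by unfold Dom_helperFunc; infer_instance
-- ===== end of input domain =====

-- B skips non-alphabetic characters with an in-place converging two-pointer scan over the
-- lowered string, instead of A's building a cleaned copy by char-by-char concatenation and
-- index-looping over it (alternative: same result, O(1) extra space, no intermediate string).

-- ===== PORT A =====
-- the 'for i in range(0, n//2): if new[i] != new[-(i+1)]: return False' loop (early return = stop folding)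
def helperFuncAux (new : List Char) : List Int → Bool
  | [] => true
  | i :: rest =>
      if PySem.List.pyGetD new i ' ' ≠ PySem.List.pyGetD new (-(i + 1)) ' ' then false
      else helperFuncAux new rest

def helperFunc (sampleStr : String) : Bool :=
  let temp := PySem.Str.lower sampleStr
  let new : List Char :=
    temp.toList.foldl (fun acc letter => if PySem.Chars.isalpha letter then acc ++ [letter] else acc) []
  let n : Int := new.length
  helperFuncAux new (PySem.List.pyRange 0 (PySem.Int.floordiv n 2) 1)

-- ===== PORT B =====
-- the 'while i < j: …' loop of Source B; s[i]/s[j] are ported with pyGetD (both indices are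
-- always in range while the loop runs, since 0 ≤ i < j < len s is an invariant)
def helperFuncAltLoop (s : List Char) (i j : Int) : Bool :=
  if h : i < j then
    if ¬ PySem.Chars.isalpha (PySem.List.pyGetD s i ' ') then
      helperFuncAltLoop s (i + 1) j
    else if ¬ PySem.Chars.isalpha (PySem.List.pyGetD s j ' ') then
      helperFuncAltLoop s i (j - 1)
    else if PySem.List.pyGetD s i ' ' ≠ PySem.List.pyGetD s j ' ' then
      false
    else
      helperFuncAltLoop s (i + 1) (j - 1)
  else
    true
termination_by (j - i).toNat
decreasing_by all_goals omega

def helperFunc_alt (sampleStr : String) : Bool :=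
  let s : List Char := PySem.Chars.lower sampleStr.toList
  helperFuncAltLoop s 0 ((s.length : Int) - 1)

-- ===== PRECONDITION & SPEC =====
def Spec_helperFunc (sampleStr : String) (out : Bool) : Prop := out = helperFunc_alt sampleStr
instance (sampleStr : String) (out : Bool) : Decidable (Spec_helperFunc sampleStr out) := by unfold Spec_helperFunc; infer_instance

-- ===== CLAIM (what is proved, stated in full; the proofs are below) =====
def Claim_equal_helperFunc : Prop := ∀ (sampleStr : String), Dom_helperFunc sampleStr → Spec_helperFunc sampleStr (helperFunc sampleStr)

-- ===== LEMMAS AND PROOFS =====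

-- the early-exit loop is an 'all' over the index list
theorem helperFuncAux_eq_all (new : List Char) (is : List Int) :
    helperFuncAux new is =
      is.all (fun i => decide (PySem.List.pyGetD new i ' ' = PySem.List.pyGetD new (-(i + 1)) ' ')) := by
  induction is with
  | nil => rfl
  | cons i rest ih =>
      rw [List.all_cons, ← ih]
      by_cases h : PySem.List.pyGetD new i ' ' = PySem.List.pyGetD new (-(i + 1)) ' ' <;>
        simp [helperFuncAux, h]

-- the half-length pointwise check is equivalent to equality with the reversal
theorem half_check_iff_palindrome (l : List Char) :
    (∀ i : Int, 0 ≤ i → i < (l.length : Int) / 2 →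
        PySem.List.pyGetD l i ' ' = PySem.List.pyGetD l (-(i + 1)) ' ') ↔ l = l.reverse := by
  have key : ∀ (k : Nat) (hk : k + 1 ≤ l.length),
      (PySem.List.pyGetD l (k : Int) ' ' = PySem.List.pyGetD l (-((k : Int) + 1)) ' ') ↔
        l[k]'(by omega) = l[l.length - 1 - k]'(by omega) := by
    intro k hk
    rw [PySem.List.pyGetD_eq_getElem _ ' ' (by omega) (by omega)]
    have h2 : -((k : Int) + 1) = -(((k + 1 : Nat) : Int)) := by push_cast; ring
    rw [h2, PySem.List.pyGetD_neg_natCast _ _ _ (by omega) (by omega)]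
    have h4 : l.length - (k + 1) = l.length - 1 - k := by omega
    constructor <;> intro hx
    · simpa only [Int.toNat_natCast, h4] using hx
    · simp only [Int.toNat_natCast, h4]; exact hx
  constructor
  · intro h
    apply List.ext_getElem (by simp)
    intro k hk hk'
    rw [List.getElem_reverse]
    rcases lt_or_ge k (l.length / 2) with hkh | hkh
    · exact (key k (by omega)).mp (h k (by omega) (by omega))
    · rcases Nat.lt_trichotomy k (l.length - 1 - k) with hmid | hmid | hmid
      · omega
      · simp [show l.length - 1 - k = k by omega]
      · set j := l.length - 1 - k with hj
        have hjk : l.length - 1 - j = k := by omega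
        have := (key j (by omega)).mp (h j (by omega) (by omega))
        simp only [hjk] at this
        exact this.symm
  · intro h i hi0 hi2
    have hk : i.toNat + 1 ≤ l.length := by omega
    have hi : i = ((i.toNat : Nat) : Int) := by omega
    rw [hi]
    apply (key i.toNat hk).mpr
    have hrev := List.getElem_of_eq h (i := i.toNat) (by omega)
    rw [hrev, List.getElem_reverse]

theorem pyRange_all_half (l : List Char) :
    (PySem.List.pyRange 0 ((l.length : Int) / 2) 1).all
        (fun i => decide (PySem.List.pyGetD l i ' ' = PySem.List.pyGetD l (-(i + 1)) ' ')) =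
      (l == l.reverse) := by
  apply Bool.eq_iff_iff.mpr
  rw [List.all_eq_true, beq_iff_eq]
  rw [← half_check_iff_palindrome l]
  constructor
  · intro h i h0 h2
    exact of_decide_eq_true (h i (PySem.List.mem_pyRange_one.mpr ⟨h0, h2⟩))
  · intro h i hi
    rcases PySem.List.mem_pyRange_one.mp hi with ⟨h0, h2⟩
    exact decide_eq_true (h i h0 h2)

-- A equals: cleaned list compared with its reversal
theorem helperFunc_eq_pal (sampleStr : String) :
    helperFunc sampleStr =
      (let f := (PySem.Chars.lower sampleStr.toList).filter PySem.Chars.isalpha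
       f == f.reverse) := by
  unfold helperFunc
  simp only [PySem.List.foldl_append_if_eq_filter, List.nil_append, PySem.Str.toList_lower,
    helperFuncAux_eq_all, PySem.Int.floordiv_eq_ediv_of_pos (b := 2) (by omega)]
  rw [pyRange_all_half]

-- the filtered slice s[i..j] (inclusive) that the two-pointer loop still has to check
def seg (s : List Char) (i j : Int) : List Char :=
  ((s.drop i.toNat).take (j - i + 1).toNat).filter PySem.Chars.isalpha

theorem length_le_one_pal {l : List Char} (h : l.length ≤ 1) : (l == l.reverse) = true := by
  match l, h with
  | [], _ => rfl
  | [a], _ => simp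

theorem pal_cons_append_singleton (a b : Char) (m : List Char) :
    ((a :: (m ++ [b])) == (a :: (m ++ [b])).reverse) = ((a == b) && (m == m.reverse)) := by
  apply Bool.eq_iff_iff.mpr
  simp only [Bool.and_eq_true, beq_iff_eq, List.reverse_cons, List.reverse_append,
    List.reverse_nil, List.nil_append]
  constructor
  · intro h
    obtain ⟨hab, hm, -⟩ : a = b ∧ m = m.reverse ∧ b = a := by simpa using h
    exact ⟨hab, hm⟩
  · rintro ⟨hab, hm⟩
    subst hab
    simp [← hm]

-- raw-segment decompositions
theorem seg_drop_left (s : List Char) (i j : Int) (h0 : 0 ≤ i) (hij : i < j)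
    (hj : j < (s.length : Int)) (hna : PySem.Chars.isalpha (s[i.toNat]'(by omega)) = false) :
    seg s i j = seg s (i + 1) j := by
  unfold seg
  have hi : i.toNat < s.length := by omega
  have hd : s.drop i.toNat = s[i.toNat] :: s.drop (i.toNat + 1) := List.drop_eq_getElem_cons hi
  have ht : (j - i + 1).toNat = (j - (i + 1) + 1).toNat + 1 := by omega
  have hi1 : (i + 1).toNat = i.toNat + 1 := by omega
  rw [hd, ht, List.take_succ_cons, List.filter_cons, hna, hi1]
  simp

theorem seg_drop_right (s : List Char) (i j : Int) (h0 : 0 ≤ i) (hij : i < j)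
    (hj : j < (s.length : Int)) (hna : PySem.Chars.isalpha (s[j.toNat]'(by omega)) = false) :
    seg s i j = seg s i (j - 1) := by
  unfold seg
  have hk : (j - i + 1).toNat = (j - 1 - i + 1).toNat + 1 := by omega
  have hlen : (j - 1 - i + 1).toNat < (s.drop i.toNat).length := by
    rw [List.length_drop]; omega
  rw [hk, List.take_succ, List.getElem?_eq_getElem hlen, List.getElem_drop]
  have hidx : i.toNat + (j - 1 - i + 1).toNat = j.toNat := by omega
  simp only [Option.toList_some, List.filter_append]
  rw [List.filter_cons]
  simp only [hidx, hna]
  simp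

theorem seg_both (s : List Char) (i j : Int) (h0 : 0 ≤ i) (hij : i < j)
    (hj : j < (s.length : Int))
    (hai : PySem.Chars.isalpha (s[i.toNat]'(by omega)) = true)
    (haj : PySem.Chars.isalpha (s[j.toNat]'(by omega)) = true) :
    seg s i j = s[i.toNat]'(by omega) :: (seg s (i + 1) (j - 1) ++ [s[j.toNat]'(by omega)]) := by
  unfold seg
  have hi : i.toNat < s.length := by omega
  have hd : s.drop i.toNat = s[i.toNat] :: s.drop (i.toNat + 1) := List.drop_eq_getElem_cons hi
  have ht : (j - i + 1).toNat = ((j - 1 - (i + 1) + 1).toNat + 1) + 1 := by omega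
  have hi1 : (i + 1).toNat = i.toNat + 1 := by omega
  rw [hd, ht, List.take_succ_cons, List.filter_cons, hai]
  have hlen : (j - 1 - (i + 1) + 1).toNat < (s.drop (i.toNat + 1)).length := by
    rw [List.length_drop]; omega
  rw [List.take_succ, List.getElem?_eq_getElem hlen, List.getElem_drop]
  have hidx : i.toNat + 1 + (j - 1 - (i + 1) + 1).toNat = j.toNat := by omega
  simp only [Option.toList_some, List.filter_append, hidx]
  rw [List.filter_cons]
  simp only [haj, hi1]
  simp

-- main invariant: the two-pointer loop decides whether seg s i j is a palindrome
theorem helperFuncAltLoop_eq_seg (s : List Char) (n : Nat) :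
    ∀ (i j : Int), (j - i).toNat ≤ n → 0 ≤ i → j < (s.length : Int) →
      helperFuncAltLoop s i j = (seg s i j == (seg s i j).reverse) := by
  induction n with
  | zero =>
      intro i j hn h0 hj
      rw [helperFuncAltLoop]
      have hij : ¬ i < j := by omega
      rw [dif_neg hij]
      have : (seg s i j).length ≤ 1 := by
        have h1 : (seg s i j).length ≤ ((s.drop i.toNat).take (j - i + 1).toNat).length :=
          List.length_filter_le _ _
        have h2 : ((s.drop i.toNat).take (j - i + 1).toNat).length ≤ (j - i + 1).toNat := by
          simpa using List.length_take_le _ _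
        omega
      exact (length_le_one_pal this).symm
  | succ n ih =>
      intro i j hn h0 hj
      rw [helperFuncAltLoop]
      by_cases hij : i < j
      · rw [dif_pos hij]
        have hgi : PySem.List.pyGetD s i ' ' = s[i.toNat]'(by omega) :=
          PySem.List.pyGetD_eq_getElem _ ' ' (by omega) (by omega)
        have hgj : PySem.List.pyGetD s j ' ' = s[j.toNat]'(by omega) :=
          PySem.List.pyGetD_eq_getElem _ ' ' (by omega) (by omega)
        rw [hgi, hgj]
        by_cases hai : PySem.Chars.isalpha (s[i.toNat]'(by omega)) = true
        · by_cases haj : PySem.Chars.isalpha (s[j.toNat]'(by omega)) = true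
          · simp only [hai, haj, not_true, if_neg, Bool.not_true]
            rw [if_neg (by simp), if_neg (by simp)]
            by_cases heq : s[i.toNat]'(by omega) = s[j.toNat]'(by omega)
            · rw [if_neg (by simpa using heq)]
              rw [ih (i + 1) (j - 1) (by omega) (by omega) (by omega)]
              rw [seg_both s i j h0 hij hj hai haj, pal_cons_append_singleton]
              simp [heq]
            · rw [if_pos (by simpa using heq)]
              rw [seg_both s i j h0 hij hj hai haj, pal_cons_append_singleton]
              simp [heq]
          · have haj' : PySem.Chars.isalpha (s[j.toNat]'(by omega)) = false := by
              simpa using haj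
            rw [if_neg (by simp [hai]), if_pos (by simp [haj'])]
            rw [ih i (j - 1) (by omega) h0 (by omega), seg_drop_right s i j h0 hij hj haj']
        · have hai' : PySem.Chars.isalpha (s[i.toNat]'(by omega)) = false := by
            simpa using hai
          rw [if_pos (by simp [hai'])]
          rw [ih (i + 1) j (by omega) (by omega) hj, seg_drop_left s i j h0 hij hj hai']
      · rw [dif_neg hij]
        have : (seg s i j).length ≤ 1 := by
          have h1 : (seg s i j).length ≤ ((s.drop i.toNat).take (j - i + 1).toNat).length :=
            List.length_filter_le _ _
          have h2 : ((s.drop i.toNat).take (j - i + 1).toNat).length ≤ (j - i + 1).toNat := by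
            simpa using List.length_take_le _ _
          omega
        exact (length_le_one_pal this).symm

theorem helperFunc_alt_eq_pal (sampleStr : String) :
    helperFunc_alt sampleStr =
      (let f := (PySem.Chars.lower sampleStr.toList).filter PySem.Chars.isalpha
       f == f.reverse) := by
  unfold helperFunc_alt
  set s := PySem.Chars.lower sampleStr.toList with hs
  have := helperFuncAltLoop_eq_seg s s.length 0 ((s.length : Int) - 1)
    (by omega) (by omega) (by omega)
  rw [this]
  have hseg : seg s 0 ((s.length : Int) - 1) = s.filter PySem.Chars.isalpha := by
    unfold seg
    have h1 : ((0 : Int)).toNat = 0 := rfl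
    have h2 : ((s.length : Int) - 1 - 0 + 1).toNat = s.length := by omega
    rw [h1, h2, List.drop_zero, List.take_length]
  rw [hseg]

-- ===== VERDICT (by name: the statement is the Claim_ definition above) =====
theorem helperFunc_spec : Claim_equal_helperFunc := by
  intro s _
  show helperFunc s = helperFunc_alt s
  rw [helperFunc_eq_pal, helperFunc_alt_eq_pal]
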